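-- pv_equiv track=rewrite | github.com/wheel-tenders/HaroldAi | app.py | is_math_related_text
-- ===== SOURCE A (Python) =====
-- MATH_KEYWORDS = {
--     "math", "algebra", "geometry", "trigonometry", "trig", "calculus", "derivative",
--     "integral", "equation", "solve", "simplify", "factor", "fraction", "decimal",
--     "percent", "probability", "statistics", "mean", "median", "mode", "sum",
--     "difference", "product", "quotient", "slope", "angle", "area", "volume",
--     "perimeter", "ratio", "proportion", "polynomial", "integer", "variable"
-- }
--
-- def is_math_related_text(text: str) -> bool:
--     lowered = (text or "").lower()
--     if not lowered:
--         return False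
--     if any(ch in lowered for ch in "+-*/=^%()[]{}<>"):
--         return True
--     if any(char.isdigit() for char in lowered):
--         return True
--     return any(word in lowered for word in MATH_KEYWORDS)
-- ===== SOURCE B (Python) =====
-- # Alternative implementation: one fused left-to-right scan over positions (symbol/digit
-- # check and keyword prefix-at-position check merged), instead of three separate
-- # whole-string passes with 34 independent substring scans.
-- MATH_KEYWORDS = {
--     "math", "algebra", "geometry", "trigonometry", "trig", "calculus", "derivative",
--     "integral", "equation", "solve", "simplify", "factor", "fraction", "decimal",
--     "percent", "probability", "statistics", "mean", "median", "mode", "sum",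
--     "difference", "product", "quotient", "slope", "angle", "area", "volume",
--     "perimeter", "ratio", "proportion", "polynomial", "integer", "variable"
-- }
--
-- _SYMBOLS = frozenset("+-*/=^%()[]{}<>")
-- _WORDS = tuple(MATH_KEYWORDS)
--
-- def is_math_related_text(text: str) -> bool:
--     lowered = (text or "").lower()
--     for i, c in enumerate(lowered):
--         if c in _SYMBOLS or c.isdigit():
--             return True
--         for w in _WORDS:
--             if lowered.startswith(w, i):
--                 return True
--     return False
-- ===== Notes on version B (the rewrite author's own statement) =====
-- stated objective: alternative
-- what changed: Replaces A's three separate whole-string passes (16 per-symbol membership scans, a digit pass, 34 independent keyword substring scans) with a single fused left-to-right scan that at each position tests the character against the symbol set / isdigit and tests each keyword as a prefix at that position.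
import Mathlib
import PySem

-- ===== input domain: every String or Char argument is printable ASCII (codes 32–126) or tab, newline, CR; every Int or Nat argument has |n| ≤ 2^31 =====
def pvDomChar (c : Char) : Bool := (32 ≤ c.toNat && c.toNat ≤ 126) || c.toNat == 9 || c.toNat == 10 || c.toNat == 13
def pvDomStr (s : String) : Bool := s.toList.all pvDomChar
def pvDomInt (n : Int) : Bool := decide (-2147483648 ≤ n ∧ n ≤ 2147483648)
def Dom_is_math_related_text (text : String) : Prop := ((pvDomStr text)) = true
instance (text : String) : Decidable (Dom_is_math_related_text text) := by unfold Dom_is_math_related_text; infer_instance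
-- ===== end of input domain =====

-- B replaces A's three whole-string passes (34 substring scans) by one fused
-- position scan; alternative decomposition, same asymptotic cost.


-- ===== PORT A =====
-- MATH_KEYWORDS is a Python set: distinct elements, built with PySem.Set.ofList
def mathKeywords : List String := PySem.Set.ofList
  ["math", "algebra", "geometry", "trigonometry", "trig", "calculus", "derivative",
   "integral", "equation", "solve", "simplify", "factor", "fraction", "decimal",
   "percent", "probability", "statistics", "mean", "median", "mode", "sum",
   "difference", "product", "quotient", "slope", "angle", "area", "volume",
   "perimeter", "ratio", "proportion", "polynomial", "integer", "variable"]

def is_math_related_text (text : String) : Bool :=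
  let lowered := PySem.Chars.lower text.toList   -- (text or "").lower(); 'or' is identity on str inputs
  if lowered.isEmpty then false                  -- if not lowered: return False
  else if ("+-*/=^%()[]{}<>".toList).any (fun ch => PySem.Chars.isIn [ch] lowered) then true
  else if lowered.any (fun c => PySem.Chars.isdigit c) then true
  else mathKeywords.any (fun w => PySem.Chars.isIn w.toList lowered)

-- ===== PORT B =====
def bSymbols : List Char := "+-*/=^%()[]{}<>".toList

def bWords : List String :=
  ["math", "algebra", "geometry", "trigonometry", "trig", "calculus", "derivative",
   "integral", "equation", "solve", "simplify", "factor", "fraction", "decimal",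
   "percent", "probability", "statistics", "mean", "median", "mode", "sum",
   "difference", "product", "quotient", "slope", "angle", "area", "volume",
   "perimeter", "ratio", "proportion", "polynomial", "integer", "variable"]

-- per-character test 'c in _SYMBOLS or c.isdigit()'
def bTest (c : Char) : Bool := bSymbols.contains c || PySem.Chars.isdigit c

-- the fused scan: at each position, symbol/digit test then keyword prefix test
-- (lowered.startswith(w, i) is exactly: w.toList is a prefix of the suffix at i)
def bScan : List Char → Bool
  | [] => false
  | c :: rest =>
    if bTest c then true
    else if bWords.any (fun w => w.toList.isPrefixOf (c :: rest)) then true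
    else bScan rest

def is_math_related_text_alt (text : String) : Bool :=
  bScan (PySem.Chars.lower text.toList)

-- ===== PRECONDITION & SPEC =====
def Spec_is_math_related_text (text : String) (out : Bool) : Prop := out = is_math_related_text_alt text
instance (text : String) (out : Bool) : Decidable (Spec_is_math_related_text text out) := by unfold Spec_is_math_related_text; infer_instance

-- ===== CLAIM (what is proved, stated in full; the proofs are below) =====
def Claim_equal_is_math_related_text : Prop := ∀ (text : String), Dom_is_math_related_text text → Spec_is_math_related_text text (is_math_related_text text)

-- ===== LEMMAS AND PROOFS =====

theorem any_or_split (l : List Char) (p q : Char → Bool) :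
    (l.any fun c => p c || q c) = (l.any p || l.any q) := by
  induction l with
  | nil => rfl
  | cons a t ih =>
    simp only [List.any_cons, ih]
    cases p a <;> cases q a <;> simp

-- the scan equals: some position passes the char test, or some keyword occurs as an infix
theorem bScan_eq (cs : List Char) :
    bScan cs = ((cs.any bTest) || (bWords.any (fun w => PySem.Chars.isIn w.toList cs))) := by
  induction cs with
  | nil => decide
  | cons c rest ih =>
    have hb : bScan (c :: rest) =
        (bTest c || ((bWords.any fun w => w.toList.isPrefixOf (c :: rest)) || bScan rest)) := by
      rw [bScan]; split_ifs with h1 h2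
      · simp [h1]
      · simp [h1, h2]
      · simp [h1, h2]
    apply Bool.eq_iff_iff.mpr
    rw [hb, ih]
    simp only [List.any_cons, Bool.or_eq_true, List.any_eq_true,
      PySem.Chars.isIn_iff_infix, List.isPrefixOf_iff_prefix, List.infix_cons_iff]
    constructor
    · rintro (h | (⟨w, hw, hp⟩ | (h | ⟨w, hw, hi⟩)))
      · exact Or.inl (Or.inl h)
      · exact Or.inr ⟨w, hw, Or.inl hp⟩
      · exact Or.inl (Or.inr h)
      · exact Or.inr ⟨w, hw, Or.inr hi⟩
    · rintro ((h | h) | ⟨w, hw, hp | hi⟩)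
      · exact Or.inl h
      · exact Or.inr (Or.inr (Or.inl h))
      · exact Or.inr (Or.inl ⟨w, hw, hp⟩)
      · exact Or.inr (Or.inr (Or.inr ⟨w, hw, hi⟩))

-- a one-char string is 'in' a string iff the char is an element
theorem isIn_singleton (a : Char) (l : List Char) :
    PySem.Chars.isIn [a] l = l.contains a := by
  apply Bool.eq_iff_iff.mpr
  simp only [PySem.Chars.isIn_iff_infix, List.contains_eq_mem, decide_eq_true_eq]
  constructor
  · intro h; exact h.subset (by simp)
  · intro h
    obtain ⟨s, t, rfl⟩ := List.append_of_mem h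
    exact ⟨s, t, by simp⟩

-- A's per-symbol membership passes = one pass testing each char against the symbol set
theorem symAny_swap (l : List Char) :
    (("+-*/=^%()[]{}<>".toList).any (fun ch => PySem.Chars.isIn [ch] l)) =
      l.any (fun c => bSymbols.contains c) := by
  apply Bool.eq_iff_iff.mpr
  simp only [List.any_eq_true, isIn_singleton, List.contains_eq_mem, decide_eq_true_eq, bSymbols]
  exact ⟨fun ⟨ch, h1, h2⟩ => ⟨ch, h2, h1⟩, fun ⟨c, h1, h2⟩ => ⟨c, h2, h1⟩⟩

-- ===== VERDICT (by name: the statement is the Claim_ definition above) =====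
theorem is_math_related_text_spec : Claim_equal_is_math_related_text := by
  intro text _
  unfold Spec_is_math_related_text is_math_related_text is_math_related_text_alt
  set l := PySem.Chars.lower text.toList with hl
  by_cases hnil : l = []
  · simp [hnil, bScan]
  · rw [bScan_eq]
    simp only [List.isEmpty_iff, hnil, if_false]
    have hmk : mathKeywords = bWords := by decide
    have hsplit : l.any bTest = (l.any (fun c => bSymbols.contains c) || l.any PySem.Chars.isdigit) :=
      any_or_split l _ _
    rw [hmk, symAny_swap, hsplit]
    split_ifs with h1 h2
    · rw [h1]; simp
    · rw [h2]; simp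
    · rw [Bool.not_eq_true] at h1 h2
      rw [h1, h2]; simp
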